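-- pv_equiv track=rewrite | github.com/edithatogo/ee_trd | archive/v1_legacy/v1_submissions/deduplicate_references.py | parse_ris_entries
-- ===== SOURCE A (Python) =====
-- def parse_ris_entries(content):
--     """Parse RIS content into individual entries"""
--     entries = []
--     current_entry = []
--
--     for line in content.split('\n'):
--         line = line.strip()
--         if line.startswith('TY'):
--             if current_entry:
--                 entries.append('\n'.join(current_entry))
--                 current_entry = []
--         current_entry.append(line)
--
--     if current_entry:
--         entries.append('\n'.join(current_entry))
--
--     return entries
-- ===== SOURCE B (Python) =====
-- def parse_ris_entries(content):
--     """Parse RIS content into individual entries: scan boundary-to-boundary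
--     with two indices and slice each entry out, instead of an incremental
--     flush-on-boundary accumulator loop."""
--     stripped = [l.strip() for l in content.split('\n')]
--     n = len(stripped)
--     entries = []
--     i = 0
--     while i < n:
--         j = i + 1
--         while j < n and not stripped[j].startswith('TY'):
--             j += 1
--         entries.append('\n'.join(stripped[i:j]))
--         i = j
--     return entries
-- ===== Notes on version B (the rewrite author's own statement) =====
-- stated objective: alternative
-- what changed: B replaces A's single-pass accumulator loop (flush current entry whenever a TY line arrives) by boundary scanning: after one stripping pass it repeatedly advances an index to the next TY boundary and slices each whole entry out of the line list, so no per-line entry buffer is maintained.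
import Mathlib
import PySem

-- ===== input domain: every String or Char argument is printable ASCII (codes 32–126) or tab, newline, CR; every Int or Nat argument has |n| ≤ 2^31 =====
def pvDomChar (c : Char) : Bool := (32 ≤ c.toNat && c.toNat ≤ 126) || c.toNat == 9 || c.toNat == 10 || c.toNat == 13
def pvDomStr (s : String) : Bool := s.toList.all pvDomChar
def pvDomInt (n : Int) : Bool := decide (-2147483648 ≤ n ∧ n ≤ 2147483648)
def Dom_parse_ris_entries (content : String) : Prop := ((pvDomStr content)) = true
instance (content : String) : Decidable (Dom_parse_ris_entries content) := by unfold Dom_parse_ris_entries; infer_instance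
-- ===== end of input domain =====

-- B replaces A's incremental flush-on-boundary accumulator loop with boundary scanning:
-- after one stripping pass it advances an index to the next TY boundary and slices each
-- whole entry out; same O(n) cost, alternative decomposition.

-- line.startswith('TY')
def pvIsTy (l : String) : Bool := PySem.Str.startswith l "TY"

-- ===== PORT A =====
-- one loop iteration of A: strip, maybe flush on TY, append the line to the current entry
def pvStepA (st : List String × List String) (line : String) : List String × List String :=
  let line := PySem.Str.strip line
  let st :=
    if pvIsTy line then
      if st.2.isEmpty then st else (st.1 ++ [PySem.Str.join "\n" st.2], [])
    else st
  (st.1, st.2 ++ [line])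

def parse_ris_entries (content : String) : List String :=
  let st := ((PySem.Str.split? content "\n").getD []).foldl pvStepA ([], [])
  if st.2.isEmpty then st.1 else st.1 ++ [PySem.Str.join "\n" st.2]

-- ===== PORT B =====
-- inner while loop of B: advance j while j < n and stripped[j] is not a TY line
-- (the j < n guard keeps the Python index in range, so getD never uses its default)
def pvScanTy (stripped : List String) (n j : Nat) : Nat :=
  if j < n ∧ pvIsTy (stripped.getD j "") = false then pvScanTy stripped n (j + 1) else j
termination_by n - j

-- the port's outer loop needs j > i for termination: the scan never moves backwards
theorem pvScanTy_ge : ∀ (stripped : List String) (n j : Nat), j ≤ pvScanTy stripped n j := by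
  intro stripped n j
  induction j using pvScanTy.induct stripped n with
  | case1 j h ih => rw [pvScanTy, if_pos h]; omega
  | case2 j h => rw [pvScanTy, if_neg h]

-- outer while loop of B: slice the entry stripped[i:j] out, continue at j
def pvOuter (stripped : List String) (n i : Nat) : List String :=
  if _h : i < n then
    let j := pvScanTy stripped n (i + 1)
    PySem.Str.join "\n" (PySem.List.slice stripped (some (i : Int)) (some (j : Int))) ::
      pvOuter stripped n j
  else []
termination_by n - i
decreasing_by
  have := pvScanTy_ge stripped n (i + 1)
  omega

def parse_ris_entries_alt (content : String) : List String :=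
  let stripped := ((PySem.Str.split? content "\n").getD []).map PySem.Str.strip
  pvOuter stripped stripped.length 0

-- ===== PRECONDITION & SPEC =====
def Spec_parse_ris_entries (content : String) (out : List String) : Prop := out = parse_ris_entries_alt content
instance (content : String) (out : List String) : Decidable (Spec_parse_ris_entries content out) := by unfold Spec_parse_ris_entries; infer_instance

-- ===== CLAIM (what is proved, stated in full; the proofs are below) =====
def Claim_equal_parse_ris_entries : Prop := ∀ (content : String), Dom_parse_ris_entries content → Spec_parse_ris_entries content (parse_ris_entries content)

-- ===== LEMMAS AND PROOFS =====

-- proof-only spec: split a line list at the first TY line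
def pvSplitAtTy : List String → List String × List String
  | [] => ([], [])
  | l :: ls =>
    if pvIsTy l then ([], l :: ls)
    else (l :: (pvSplitAtTy ls).1, (pvSplitAtTy ls).2)

theorem pvSplitAtTy_len : ∀ ls : List String, (pvSplitAtTy ls).2.length ≤ ls.length := by
  intro ls
  induction ls with
  | nil => simp [pvSplitAtTy]
  | cons l ls ih =>
    simp only [pvSplitAtTy]
    split_ifs
    · simp
    · simp; omega

theorem pvSplitAtTy_eq (ls : List String) :
    pvSplitAtTy ls = (ls.takeWhile (fun l => !pvIsTy l), ls.dropWhile (fun l => !pvIsTy l)) := by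
  induction ls with
  | nil => simp [pvSplitAtTy]
  | cons l ls ih =>
    by_cases h : pvIsTy l = true
    · simp [pvSplitAtTy, h]
    · simp only [Bool.not_eq_true] at h
      simp [pvSplitAtTy, h, ih]

-- proof-only spec: the grouping both programs compute
def pvGroups : List String → List String
  | [] => []
  | x :: xs =>
    PySem.Str.join "\n" (x :: (pvSplitAtTy xs).1) :: pvGroups (pvSplitAtTy xs).2
termination_by l => l.length
decreasing_by
  have := pvSplitAtTy_len xs
  simpa using Nat.lt_succ_of_le this

-- A's step on an already-stripped line
def pvStepA' (st : List String × List String) (line : String) : List String × List String :=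
  let st :=
    if pvIsTy line then
      if st.2.isEmpty then st else (st.1 ++ [PySem.Str.join "\n" st.2], [])
    else st
  (st.1, st.2 ++ [line])

def pvFinishA (st : List String × List String) : List String :=
  if st.2.isEmpty then st.1 else st.1 ++ [PySem.Str.join "\n" st.2]

theorem pvA_inv : ∀ (ls : List String) (es cur : List String), cur ≠ [] →
    pvFinishA (ls.foldl pvStepA' (es, cur)) =
      es ++ (PySem.Str.join "\n" (cur ++ (pvSplitAtTy ls).1) :: pvGroups (pvSplitAtTy ls).2) := by
  intro ls
  induction ls with
  | nil =>
    intro es cur hcur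
    simp [pvFinishA, pvSplitAtTy, pvGroups, hcur]
  | cons l ls ih =>
    intro es cur hcur
    have hne : cur.isEmpty = false := by simpa [List.isEmpty_iff] using hcur
    by_cases hty : pvIsTy l = true
    · have hstep : pvStepA' (es, cur) l = (es ++ [PySem.Str.join "\n" cur], [l]) := by
        simp [pvStepA', hty, hne]
      rw [List.foldl_cons, hstep, ih _ [l] (by simp)]
      simp [pvSplitAtTy, hty, pvGroups]
    · have hstep : pvStepA' (es, cur) l = (es, cur ++ [l]) := by
        simp [pvStepA', hty]
      rw [List.foldl_cons, hstep, ih es (cur ++ [l]) (by simp)]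
      simp [pvSplitAtTy, hty]

theorem pvA_eq_groups : ∀ S : List String,
    pvFinishA (S.foldl pvStepA' ([], [])) = pvGroups S := by
  intro S
  cases S with
  | nil => simp [pvFinishA, pvGroups]
  | cons s t =>
    have hfirst : pvStepA' ([], []) s = ([], [s]) := by
      simp [pvStepA']
    rw [List.foldl_cons, hfirst, pvA_inv t [] [s] (by simp)]
    simp [pvGroups]

-- the inner scan finds the end of the run of non-TY lines after j
theorem pvScanTy_spec : ∀ (stripped : List String) (j : Nat),
    pvScanTy stripped stripped.length j =
      j + ((stripped.drop j).takeWhile (fun l => !pvIsTy l)).length := by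
  intro stripped j
  induction j using pvScanTy.induct stripped stripped.length with
  | case1 j h ih =>
    obtain ⟨hj, hty⟩ := h
    rw [pvScanTy, if_pos ⟨hj, hty⟩, ih]
    have hdrop : stripped.drop j = stripped[j] :: stripped.drop (j + 1) :=
      List.drop_eq_getElem_cons hj
    have hgd : stripped.getD j "" = stripped[j] := List.getD_eq_getElem stripped "" hj
    rw [hdrop, List.takeWhile_cons, hgd.symm, hty]
    simp; omega
  | case2 j h =>
    rw [pvScanTy, if_neg h]
    rcases Nat.lt_or_ge j stripped.length with hj | hj
    · have hty : pvIsTy (stripped.getD j "") = true := by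
        rcases Bool.eq_false_or_eq_true (pvIsTy (stripped.getD j "")) with h' | h'
        · exact h'
        · exact absurd ⟨hj, h'⟩ h
      have hdrop : stripped.drop j = stripped[j] :: stripped.drop (j + 1) :=
        List.drop_eq_getElem_cons hj
      have hgd : stripped.getD j "" = stripped[j] := List.getD_eq_getElem stripped "" hj
      rw [hdrop, List.takeWhile_cons, hgd.symm, hty]
      simp
    · rw [List.drop_eq_nil_of_le hj]
      simp

theorem pvTake_takeWhile (p : String → Bool) : ∀ xs : List String,
    xs.take (xs.takeWhile p).length = xs.takeWhile p := by
  intro xs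
  induction xs with
  | nil => simp
  | cons x xs ih =>
    rw [List.takeWhile_cons]
    by_cases h : p x = true
    · simp [h, ih]
    · simp [h]

theorem pvDrop_dropWhile (p : String → Bool) : ∀ xs : List String,
    xs.drop (xs.takeWhile p).length = xs.dropWhile p := by
  intro xs
  induction xs with
  | nil => simp
  | cons x xs ih =>
    rw [List.takeWhile_cons, List.dropWhile_cons]
    by_cases h : p x = true
    · simp [h, ih]
    · simp [h]

-- B's outer loop from index i computes the groups of the remaining lines
theorem pvOuter_eq_groups : ∀ (stripped : List String) (i : Nat),
    pvOuter stripped stripped.length i = pvGroups (stripped.drop i) := by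
  intro stripped i
  induction i using pvOuter.induct stripped stripped.length with
  | case1 i hi j' ih =>
    rw [pvOuter, dif_pos hi]
    have hscan := pvScanTy_spec stripped (i + 1)
    have hdrop : stripped.drop i = stripped[i] :: stripped.drop (i + 1) :=
      List.drop_eq_getElem_cons hi
    have hslice : PySem.List.slice stripped (some (i : Int)) (some ((pvScanTy stripped stripped.length (i + 1) : Nat) : Int)) =
        stripped[i] :: (stripped.drop (i + 1)).takeWhile (fun l => !pvIsTy l) := by
      rw [PySem.List.slice_natCast, hscan, hdrop]
      have he : i + 1 + ((stripped.drop (i + 1)).takeWhile (fun l => !pvIsTy l)).length - i =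
          ((stripped.drop (i + 1)).takeWhile (fun l => !pvIsTy l)).length + 1 := by omega
      rw [he, List.take_succ_cons, pvTake_takeWhile]
    have hdropj : stripped.drop (pvScanTy stripped stripped.length (i + 1)) =
        (stripped.drop (i + 1)).dropWhile (fun l => !pvIsTy l) := by
      rw [hscan, ← List.drop_drop, pvDrop_dropWhile]
    show PySem.Str.join "\n" (PySem.List.slice stripped (some (i : Int))
        (some ((pvScanTy stripped stripped.length (i + 1) : Nat) : Int))) ::
        pvOuter stripped stripped.length (pvScanTy stripped stripped.length (i + 1)) =
      pvGroups (stripped.drop i)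
    rw [ih, hslice, hdropj, hdrop]
    rw [pvGroups, pvSplitAtTy_eq]
  | case2 i hi =>
    rw [pvOuter, dif_neg hi, List.drop_eq_nil_of_le (by omega), pvGroups]

-- ===== VERDICT (by name: the statement is the Claim_ definition above) =====
theorem parse_ris_entries_spec : Claim_equal_parse_ris_entries := by
  intro content _
  unfold Spec_parse_ris_entries parse_ris_entries parse_ris_entries_alt
  have hA : ((PySem.Str.split? content "\n").getD []).foldl pvStepA ([], []) =
      (((PySem.Str.split? content "\n").getD []).map PySem.Str.strip).foldl pvStepA' ([], []) := by
    rw [List.foldl_map]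
    rfl
  simp only [hA]
  have hAg := pvA_eq_groups (((PySem.Str.split? content "\n").getD []).map PySem.Str.strip)
  have hBg := pvOuter_eq_groups (((PySem.Str.split? content "\n").getD []).map PySem.Str.strip) 0
  simp only [pvFinishA] at hAg
  rw [hAg, hBg, List.drop_zero]
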